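-- pv_equiv track=rewrite | github.com/leftomelas/RWKV-Runner | backend-python/albatross_engine/worker.py | min_swaps_to_target_fast
-- ===== SOURCE A (Python) =====
-- from typing import List, Dict, Optional, Any, Tuple
-- from collections import defaultdict
--
-- def min_swaps_to_target_fast(lst, elements: list[int]):
--     swaps: List[Tuple[int, int]] = []
--
--     # 构建每个字符在 target 中的位置队列
--     positions = defaultdict(list)
--     for idx, val in enumerate(lst):
--         positions[val].append(idx)
--
--     offsets: List[Tuple[int, int]] = []
--     offset = 0
--
--     for target in elements:
--         if target not in positions:
--             offsets.append((offset, offset))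
--             continue
--
--         pos = positions[target]
--         target_count = len(pos)
--
--         offsets.append((offset, offset + target_count))
--
--         target_should_move_back_id = [i for i in pos if i >= target_count + offset]
--         pos_set = set(pos)
--         target_avaliable_id = [i for i in range(offset, target_count + offset) if i not in pos_set]
--
--         for k, v in enumerate(target_should_move_back_id):
--             swap = (target_avaliable_id[k], v)
--             swaps.append((target_avaliable_id[k], v))
--             lst[swap[0]], lst[swap[1]] = lst[swap[1]], lst[swap[0]]
--
--         offset += target_count
--         positions = defaultdict(list)
--         for idx, val in enumerate(lst[offset:]):
--             positions[val].append(idx + offset)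
--
--     return swaps, offsets
-- ===== SOURCE B (Python) =====
-- def min_swaps_to_target_fast(lst, elements: list[int]):
--     # Like the original, mutates lst in place (the swaps are applied to it).
--     swaps = []
--     offsets = []
--     # position index (value -> set of indices) built ONCE, then maintained per swap
--     positions = {}
--     for i, v in enumerate(lst):
--         positions.setdefault(v, set()).add(i)
--     offset = 0
--     for target in elements:
--         pos = sorted(positions.pop(target, ()))
--         end = offset + len(pos)
--         offsets.append((offset, end))
--         # pos is ascending: its in-block entries are the prefix pos[:k]
--         k = 0
--         while k < len(pos) and pos[k] < end:
--             k += 1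
--         movers = pos[k:]
--         j = 0  # pointer into pos[:k]
--         t = 0  # pointer into movers
--         for slot in range(offset, end):
--             if j < k and pos[j] == slot:
--                 j += 1
--                 continue
--             p = movers[t]
--             t += 1
--             v = lst[slot]
--             swaps.append((slot, p))
--             lst[slot], lst[p] = lst[p], lst[slot]
--             positions[v].discard(slot)
--             positions[v].add(p)
--         offset = end
--     return swaps, offsets
-- ===== Notes on version B (the rewrite author's own statement) =====
-- stated objective: faster
-- what changed: A rebuilds a defaultdict of every value's positions (plus a set and two index-list comprehensions) by rescanning the whole unfixed suffix after each target; B builds a value->position-set index once, sorts a value's positions only when that value is popped, pairs block slots with out-of-block occurrences in one fused merge loop, and updates the index per swap in O(1).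
import Mathlib
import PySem

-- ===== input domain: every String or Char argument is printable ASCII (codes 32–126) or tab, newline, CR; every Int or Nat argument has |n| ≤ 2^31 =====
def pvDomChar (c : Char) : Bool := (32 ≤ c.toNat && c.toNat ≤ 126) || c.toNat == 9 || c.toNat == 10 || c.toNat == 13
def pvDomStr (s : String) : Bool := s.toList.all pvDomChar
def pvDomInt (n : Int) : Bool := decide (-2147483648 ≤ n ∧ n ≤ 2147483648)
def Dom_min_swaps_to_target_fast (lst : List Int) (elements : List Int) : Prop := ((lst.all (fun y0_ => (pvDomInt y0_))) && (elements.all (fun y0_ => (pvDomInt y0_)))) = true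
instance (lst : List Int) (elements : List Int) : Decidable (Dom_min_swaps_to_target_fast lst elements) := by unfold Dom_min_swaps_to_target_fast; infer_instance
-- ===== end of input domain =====

-- B builds the value→positions index ONCE and maintains it incrementally per swap (a set per
-- value, sorted on pop), instead of A's full rescan of the unfixed suffix after every target
-- (objective: faster — no per-target O(n) rebuild of the dict/set/index lists).
-- Both Pythons mutate `lst` in place identically; the theorems below are about the return value.

-- ===== PORT A =====

-- `lst[a], lst[b] = lst[b], lst[a]` — the identical statement occurs in both Pythons, so the
-- helper is shared; both indices are non-negative and in range whenever either port calls it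
def pySwap (lst : List Int) (a b : Int) : List Int :=
  let x := PySem.List.pyGetD lst b 0
  let y := PySem.List.pyGetD lst a 0
  PySem.List.pySetD (PySem.List.pySetD lst a x) b y

-- `positions = defaultdict(list); for idx, val in enumerate(lst[offset:]): positions[val].append(idx + offset)`
-- (A's initial build appends plain `idx`, i.e. shift 0)
def buildPositions (xs : List Int) (shift : Int) : PySem.Dict Int (List Int) :=
  (PySem.List.enumerate xs).foldl
    (fun d p => d.modify p.2 [] (fun l => l ++ [p.1 + shift])) PySem.Dict.empty

-- `for k, v in enumerate(target_should_move_back_id): …`; `target_avaliable_id[k]` is always in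
-- range (Python would raise IndexError otherwise; swapLoopA_gen below shows the index stays in range)
def swapLoopA (avail : List Int) (kvs : List (Int × Int)) (swaps : List (Int × Int))
    (lst : List Int) : List (Int × Int) × List Int :=
  kvs.foldl (fun st kv =>
    let a := PySem.List.pyGetD avail kv.1 0
    (st.1 ++ [(a, kv.2)], pySwap st.2 a kv.2)) (swaps, lst)

def loopA : List Int → PySem.Dict Int (List Int) → List Int → Int →
    List (Int × Int) → List (Int × Int) → (List (Int × Int)) × (List (Int × Int))
  | [], _, _, _, swaps, offsets => (swaps, offsets)
  | target :: rest, positions, lst, offset, swaps, offsets =>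
    match positions.get? target with
    | none => loopA rest positions lst offset swaps (offsets ++ [(offset, offset)])
    | some pos =>
      let target_count : Int := pos.length
      let offsets' := offsets ++ [(offset, offset + target_count)]
      let should := pos.filter (fun i => target_count + offset ≤ i)
      let posSet : PySem.Set Int := PySem.Set.ofList pos
      let avail := (PySem.List.pyRange offset (target_count + offset)).filter
        (fun i => !(PySem.Set.contains posSet i))
      let st := swapLoopA avail (PySem.List.enumerate should) swaps lst
      let offset' := offset + target_count
      let positions' := buildPositions (PySem.List.slice st.2 (some offset') none) offset'
      loopA rest positions' st.2 offset' st.1 offsets'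

def min_swaps_to_target_fast (lst : List Int) (elements : List Int) :
    (List (Int × Int)) × (List (Int × Int)) :=
  loopA elements (buildPositions lst 0) lst 0 [] []

-- ===== PORT B =====

-- `positions = {}; for i, v in enumerate(lst): positions.setdefault(v, set()).add(i)`
def buildIndex (xs : List Int) : PySem.Dict Int (PySem.Set Int) :=
  (PySem.List.enumerate xs).foldl
    (fun d p => d.modify p.2 [] (fun s => PySem.Set.add s p.1)) PySem.Dict.empty

-- `k = 0; while k < len(pos) and pos[k] < end: k += 1`
def skipLt (pos : List Int) (endI : Int) (j : Nat) : Nat :=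
  if h : j < pos.length then
    if PySem.List.pyGetD pos (j : Int) 0 < endI then skipLt pos endI (j + 1) else j
  else j
termination_by pos.length - j

-- `for slot in range(offset, end): …` — the fused merge/swap loop; `pos[j]` and `movers[t]` are
-- always in range when read (Python would raise IndexError otherwise), `positions[v]` always a
-- present key (Python would raise KeyError otherwise) — innerB_eq below shows both
def innerB (k : Nat) (pos movers : List Int) :
    List Int → Nat → Nat → List (Int × Int) → List Int → PySem.Dict Int (PySem.Set Int) →
    List (Int × Int) × List Int × PySem.Dict Int (PySem.Set Int)
  | [], _, _, swaps, lst, d => (swaps, lst, d)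
  | slot :: rest, j, ti, swaps, lst, d =>
    if j < k ∧ PySem.List.pyGetD pos (j : Int) 0 = slot then
      innerB k pos movers rest (j + 1) ti swaps lst d
    else
      let p := PySem.List.pyGetD movers (ti : Int) 0
      let v := PySem.List.pyGetD lst slot 0
      innerB k pos movers rest j (ti + 1) (swaps ++ [(slot, p)]) (pySwap lst slot p)
        (d.modify v [] (fun s => PySem.Set.add (PySem.Set.discard s slot) p))

def loopB : List Int → PySem.Dict Int (PySem.Set Int) → List Int → Int →
    List (Int × Int) → List (Int × Int) → (List (Int × Int)) × (List (Int × Int))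
  | [], _, _, _, swaps, offsets => (swaps, offsets)
  | target :: rest, positions, lst, offset, swaps, offsets =>
    -- `pos = sorted(positions.pop(target, ()))`
    let pos := PySem.List.sorted (positions.getD target []) (fun x => x) false
    let positions1 := positions.erase target
    let endI := offset + (pos.length : Int)
    let offsets' := offsets ++ [(offset, endI)]
    let k := skipLt pos endI 0
    let movers := PySem.List.slice pos (some (k : Int)) none
    let st := innerB k pos movers (PySem.List.pyRange offset endI) 0 0 swaps lst positions1
    loopB rest st.2.2 st.2.1 endI st.1 offsets'

def min_swaps_to_target_fast_alt (lst : List Int) (elements : List Int) :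
    (List (Int × Int)) × (List (Int × Int)) :=
  loopB elements (buildIndex lst) lst 0 [] []

-- ===== PRECONDITION & SPEC =====
def Spec_min_swaps_to_target_fast (lst : List Int) (elements : List Int) (out : (List (Int × Int)) × (List (Int × Int))) : Prop := out = min_swaps_to_target_fast_alt lst elements
instance (lst : List Int) (elements : List Int) (out : (List (Int × Int)) × (List (Int × Int))) : Decidable (Spec_min_swaps_to_target_fast lst elements out) := by unfold Spec_min_swaps_to_target_fast; infer_instance

-- ===== CLAIM (what is proved, stated in full; the proofs are below) =====
def Claim_equal_min_swaps_to_target_fast : Prop := ∀ (lst : List Int) (elements : List Int), Dom_min_swaps_to_target_fast lst elements → Spec_min_swaps_to_target_fast lst elements (min_swaps_to_target_fast lst elements)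

-- ===== LEMMAS AND PROOFS =====

-- The common shape both loops reduce to: apply a list of swap pairs left to right.
def applyPairs (ps : List (Int × Int)) (st : List (Int × Int) × List Int) :
    List (Int × Int) × List Int :=
  ps.foldl (fun st p => (st.1 ++ [p], pySwap st.2 p.1 p.2)) st

-- The same, also threading B's per-value index dict.
def applyPairsD (ps : List (Int × Int))
    (st : List (Int × Int) × List Int × PySem.Dict Int (PySem.Set Int)) :
    List (Int × Int) × List Int × PySem.Dict Int (PySem.Set Int) :=
  ps.foldl (fun st z =>
    let v := PySem.List.pyGetD st.2.1 z.1 0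
    (st.1 ++ [z], pySwap st.2.1 z.1 z.2,
      st.2.2.modify v [] (fun s => PySem.Set.add (PySem.Set.discard s z.1) z.2))) st

-- positions of value t in lst at indices ≥ o (ascending)
def posOf (lst : List Int) (o : Nat) (t : Int) : List Int :=
  (PySem.List.pyRange (o : Int) (lst.length : Int)).filter
    (fun i => PySem.List.pyGetD lst i 0 == t)

-- proof-only reference round: the direct rescan + two-pointer fill, the common meaning of both loops
def fillBlock (target : Int) (pos : List Int) :
    List Int → Nat → List (Int × Int) → List Int → List (Int × Int) × List Int × Nat
  | [], j, swaps, lst => (swaps, lst, j)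
  | i :: is, j, swaps, lst =>
    if PySem.List.pyGetD lst i 0 ≠ target then
      let p := PySem.List.pyGetD pos (j : Int) 0
      fillBlock target pos is (j + 1) (swaps ++ [(i, p)]) (pySwap lst i p)
    else fillBlock target pos is j swaps lst

def loopS : List Int → List Int → Int → List (Int × Int) → List (Int × Int) →
    (List (Int × Int)) × (List (Int × Int))
  | [], _, _, swaps, offsets => (swaps, offsets)
  | target :: rest, lst, offset, swaps, offsets =>
    let pos := (PySem.List.pyRange offset lst.length).filter
      (fun i => PySem.List.pyGetD lst i 0 == target)
    let count : Int := pos.length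
    let endI := offset + count
    let offsets' := offsets ++ [(offset, endI)]
    let j := skipLt pos endI 0
    let st := fillBlock target pos (PySem.List.pyRange offset endI) j swaps lst
    loopS rest st.2.1 endI st.1 offsets'

-- B's dict invariant: each per-value entry is a duplicate-free list holding exactly the
-- positions of that value in the unfixed suffix
def DInv (d : PySem.Dict Int (PySem.Set Int)) (lst : List Int) (o : Nat) : Prop :=
  ∀ v : Int, (d.getD v []).Nodup ∧ ∀ x : Int, x ∈ d.getD v [] ↔ x ∈ posOf lst o v

lemma length_applyPairs (ps : List (Int × Int)) (st : List (Int × Int) × List Int) :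
    (applyPairs ps st).2.length = st.2.length := by
  induction ps generalizing st with
  | nil => rfl
  | cons p ps ih =>
    simp only [applyPairs, List.foldl_cons] at *
    rw [ih]
    simp [pySwap, PySem.List.length_pySetD]
lemma pyGetD_pySwap_ne (lst : List Int) (a b x : Int) (hx : 0 ≤ x)
    (hxa : x ≠ a) (hxb : x ≠ b) (ha : 0 ≤ a) (hb : 0 ≤ b) :
    PySem.List.pyGetD (pySwap lst a b) x 0 = PySem.List.pyGetD lst x 0 := by
  have hna : x.toNat ≠ a.toNat := fun h => hxa (by omega)
  have hnb : x.toNat ≠ b.toNat := fun h => hxb (by omega)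
  simp only [pySwap, PySem.List.pySetD_of_nonneg _ _ ha, PySem.List.pySetD_of_nonneg _ _ hb,
    PySem.List.pyGetD_of_nonneg _ _ hx]
  unfold List.getD
  rw [List.getElem?_set_ne hnb.symm, List.getElem?_set_ne hna.symm]
lemma skipLt_cons_succ (l : List Int) (a e : Int) : ∀ (n j : Nat), l.length - j ≤ n →
    skipLt (a :: l) e (j + 1) = skipLt l e j + 1 := by
  intro n
  induction n with
  | zero =>
    intro j hj
    have h : ¬ j < l.length := by omega
    rw [skipLt]
    conv_rhs => rw [skipLt]
    simp [h, show ¬ (j+1 < l.length + 1) from by omega]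
  | succ n ih =>
    intro j hj
    rw [skipLt]
    conv_rhs => rw [skipLt]
    by_cases h : j < l.length
    · have hg : PySem.List.pyGetD (a :: l) ((j + 1 : Nat) : Int) 0 = PySem.List.pyGetD l (j : Int) 0 := by
        rw [PySem.List.pyGetD_of_nonneg _ _ (by omega), PySem.List.pyGetD_of_nonneg _ _ (by omega)]
        simp [List.getD]
      simp only [List.length_cons, show (j+1 < l.length + 1) = (j < l.length) from by simp,
        dif_pos h, hg]
      split_ifs with hc
      · exact ih (j+1) (by omega)
      · rfl
    · simp [h, show ¬ (j+1 < l.length + 1) from by omega]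
lemma skipLt_append (B1 B2 : List Int) (e : Int)
    (h1 : ∀ x ∈ B1, x < e) (h2 : ∀ x ∈ B2, e ≤ x) :
    skipLt (B1 ++ B2) e 0 = B1.length := by
  induction B1 with
  | nil =>
    cases B2 with
    | nil => rw [skipLt]; simp
    | cons b B2' =>
      rw [skipLt]
      have hb : e ≤ b := h2 b (by simp)
      simp [PySem.List.pyGetD_of_nonneg _ _ (le_refl (0:Int)), List.getD]
      omega
  | cons a B1' ih =>
    rw [skipLt]
    have ha : a < e := h1 a (by simp)
    have hg : PySem.List.pyGetD ((a :: B1') ++ B2) ((0:Nat) : Int) 0 = a := by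
      rw [PySem.List.pyGetD_of_nonneg _ _ (by omega)]; simp [List.getD]
    simp only [List.cons_append, List.length_cons, List.length_append]
    rw [dif_pos (by omega)]
    norm_num [hg, ha]
    rw [show ((0:Int) = ((0:Nat):Int)) from rfl] at hg
    have := skipLt_cons_succ (B1' ++ B2) a e (B1' ++ B2).length 0 (by omega)
    simp only [Nat.zero_add] at this
    rw [this, ih (fun x hx => h1 x (by simp [hx]))]
lemma swapLoopA_gen : ∀ (should av1 av2 : List Int) (swaps : List (Int × Int)) (lst : List Int),
    av2.length = should.length →
    swapLoopA (av1 ++ av2) (PySem.List.enumerate should (av1.length : Int)) swaps lst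
      = applyPairs (av2.zip should) (swaps, lst) := by
  intro should
  induction should with
  | nil =>
    intro av1 av2 swaps lst hlen
    have : av2 = [] := List.eq_nil_of_length_eq_zero hlen
    subst this
    rfl
  | cons v rest ih =>
    intro av1 av2 swaps lst hlen
    cases av2 with
    | nil => simp at hlen
    | cons a av2' =>
      rw [PySem.List.enumerate_cons]
      have ha : PySem.List.pyGetD (av1 ++ a :: av2') ((av1.length : Nat) : Int) 0 = a := by
        rw [PySem.List.pyGetD_of_nonneg _ _ (by omega)]
        simp [List.getD]
      simp only [swapLoopA, List.foldl_cons]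
      have step : ((av1.length : Int) + 1) = (((av1 ++ [a]).length : Nat) : Int) := by
        simp
      rw [show (applyPairs ((a :: av2').zip (v :: rest)) (swaps, lst))
            = applyPairs (av2'.zip rest) (swaps ++ [(a, v)], pySwap lst a v) from rfl]
      have := ih (av1 ++ [a]) av2' (swaps ++ [(a, v)], pySwap lst a v).1 (swaps ++ [(a, v)], pySwap lst a v).2 (by simpa using hlen)
      simp only [swapLoopA] at this
      rw [← List.append_cons] at this
      rw [← step] at this
      simp only [ha]
      exact this
lemma fillBlock_eq_applyPairs (t : Int) (pos : List Int) :
    ∀ (is : List Int) (j : Nat) (swaps : List (Int × Int)) (lst : List Int),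
    is.Pairwise (· < ·) →
    (∀ x ∈ is, 0 ≤ x) →
    (∀ p ∈ pos.drop j, 0 ≤ p ∧ ∀ x ∈ is, x < p) →
    (is.filter (fun i => PySem.List.pyGetD lst i 0 ≠ t)).length = (pos.drop j).length →
    (fillBlock t pos is j swaps lst).1
        = (applyPairs ((is.filter (fun i => PySem.List.pyGetD lst i 0 ≠ t)).zip (pos.drop j)) (swaps, lst)).1
      ∧ (fillBlock t pos is j swaps lst).2.1
        = (applyPairs ((is.filter (fun i => PySem.List.pyGetD lst i 0 ≠ t)).zip (pos.drop j)) (swaps, lst)).2 := by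
  intro is
  induction is with
  | nil =>
    intro j swaps lst _ _ _ hlen
    simp only [List.filter_nil, List.zip_nil_left]
    exact ⟨rfl, rfl⟩
  | cons i is ih =>
    intro j swaps lst hpw h0 hdrop hlen
    by_cases hc : PySem.List.pyGetD lst i 0 ≠ t
    · -- taken branch
      have hfc : (i :: is).filter (fun i => PySem.List.pyGetD lst i 0 ≠ t)
          = i :: is.filter (fun i => PySem.List.pyGetD lst i 0 ≠ t) := by
        simp [hc]
      have hjlt : j < pos.length := by
        rw [hfc] at hlen
        simp at hlen
        have := List.length_drop (l := pos) (i := j)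
        omega
      have hp : PySem.List.pyGetD pos (j : Int) 0 = pos[j] := by
        rw [PySem.List.pyGetD_of_nonneg _ _ (by omega)]
        simp [List.getD, List.getElem?_eq_getElem hjlt]
      have hdropj : pos.drop j = pos[j] :: pos.drop (j + 1) := List.drop_eq_getElem_cons hjlt
      set p := pos[j] with hpdef
      have hpmem : p ∈ pos.drop j := by rw [hdropj]; simp
      have hpprops := hdrop p hpmem
      have hlst' : ∀ x ∈ is, PySem.List.pyGetD (pySwap lst i p) x 0 = PySem.List.pyGetD lst x 0 := by
        intro x hx
        have hix : i < x := (List.pairwise_cons.mp hpw).1 x hx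
        exact pyGetD_pySwap_ne lst i p x (h0 x (by simp [hx])) (by omega)
          (by have := hpprops.2 x (by simp [hx]); omega) (h0 i (by simp)) hpprops.1
      have hfilter' : is.filter (fun x => PySem.List.pyGetD (pySwap lst i p) x 0 ≠ t)
          = is.filter (fun x => PySem.List.pyGetD lst x 0 ≠ t) := by
        apply List.filter_congr
        intro x hx
        simp [hlst' x hx]
      rw [fillBlock]
      simp only [if_pos hc, hp]
      have ihres := ih (j + 1) (swaps ++ [(i, p)]) (pySwap lst i p)
        (List.pairwise_cons.mp hpw).2
        (fun x hx => h0 x (by simp [hx]))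
        (by
          intro q hq
          have hqm : q ∈ pos.drop j := by rw [hdropj]; simp [hq]
          exact ⟨(hdrop q hqm).1, fun x hx => (hdrop q hqm).2 x (by simp [hx])⟩)
        (by
          rw [hfilter']
          rw [hfc] at hlen
          rw [hdropj] at hlen
          simpa using hlen)
      rw [hfilter'] at ihres
      rw [hfc, hdropj]
      have happ : applyPairs (((i :: is.filter (fun i => PySem.List.pyGetD lst i 0 ≠ t)).zip (p :: pos.drop (j+1)))) (swaps, lst)
          = applyPairs ((is.filter (fun i => PySem.List.pyGetD lst i 0 ≠ t)).zip (pos.drop (j+1))) (swaps ++ [(i, p)], pySwap lst i p) := rfl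
      rw [happ]
      exact ihres
    · -- skipped branch
      have hfc : (i :: is).filter (fun i => PySem.List.pyGetD lst i 0 ≠ t)
          = is.filter (fun i => PySem.List.pyGetD lst i 0 ≠ t) := by
        simp [hc]
      rw [fillBlock]
      simp only [if_neg hc]
      rw [hfc]
      rw [hfc] at hlen
      exact ih j swaps lst (List.pairwise_cons.mp hpw).2 (fun x hx => h0 x (by simp [hx]))
        (fun q hq => ⟨(hdrop q hq).1, fun x hx => (hdrop q hq).2 x (by simp [hx])⟩) hlen
lemma posOf_eq (lst : List Int) (o : Nat) (ho : o ≤ lst.length) (t : Int) :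
    (((PySem.List.enumerate (lst.drop o)).map (fun p => (p.2, p.1 + (o : Int)))).filter
        (fun q => q.1 == t)).map (fun q => q.2) = posOf lst o t := by
  rw [PySem.List.enumerate_eq_map_pyRange (lst.drop o) 0]
  unfold posOf
  rw [PySem.List.pyRange_one 0, PySem.List.pyRange_one (o : Int)]
  have hm : ((PySem.List.len (lst.drop o)) - 0).toNat = lst.length - o := by
    simp [PySem.List.len_eq]
  have hm2 : ((lst.length : Int) - (o : Int)).toNat = lst.length - o := by omega
  rw [hm, hm2]
  simp only [List.map_map, List.filter_map, List.map_map, Function.comp_def]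
  have hget : ∀ k : Nat, k < lst.length - o →
      PySem.List.pyGetD (lst.drop o) (0 + (k : Int)) 0 = PySem.List.pyGetD lst ((o : Int) + (k : Int)) 0 := by
    intro k hk
    rw [PySem.List.pyGetD_of_nonneg _ _ (by omega), PySem.List.pyGetD_of_nonneg _ _ (by omega)]
    simp only [List.getD]
    rw [show ((0 : Int) + (k : Int)).toNat = k from by omega,
        show (((o : Int)) + (k : Int)).toNat = o + k from by omega]
    rw [List.getElem?_drop]
  rw [List.filter_congr (fun k hk => by
    rw [hget k (List.mem_range.mp hk)])]
  apply List.map_congr_left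
  intro k _
  ring
lemma buildPositions_get? (lst : List Int) (o : Nat) (ho : o ≤ lst.length) (t : Int) :
    (buildPositions (PySem.List.slice lst (some (o : Int)) none) (o : Int)).get? t
      = if posOf lst o t = [] then none else some (posOf lst o t) := by
  have hsl : PySem.List.slice lst (some (o : Int)) none = lst.drop o := by
    rw [PySem.List.slice_from lst (by omega : (0:Int) ≤ (o : Int))]
    simp
  rw [hsl]
  unfold buildPositions
  set L := (PySem.List.enumerate (lst.drop o)).map (fun p => (p.2, p.1 + (o : Int))) with hL
  have hfold : (PySem.List.enumerate (lst.drop o)).foldl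
      (fun d p => d.modify p.2 [] (fun l => l ++ [p.1 + (o : Int)])) PySem.Dict.empty
    = L.foldl (fun d q => d.modify q.1 [] (fun l => l ++ [q.2])) PySem.Dict.empty := by
    rw [hL, List.foldl_map]
  rw [hfold]
  have hkeys : (L.foldl (fun d q => d.modify q.1 [] (fun l => l ++ [q.2])) PySem.Dict.empty).keys
      = PySem.Set.ofList (lst.drop o) := by
    have := PySem.Dict.keys_foldl_modify_key L (fun q => q.1) ([] : List Int)
      (fun _ q => fun l => l ++ [q.2]) PySem.Dict.empty
    rw [this, PySem.Dict.keys_empty]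
    have hfst : L.map (fun q => q.1) = lst.drop o := by
      rw [hL, List.map_map]
      exact PySem.List.map_snd_enumerate (lst.drop o) 0
    rw [hfst]
    rfl
  have hgetD : (L.foldl (fun d q => d.modify q.1 [] (fun l => l ++ [q.2])) PySem.Dict.empty).getD t []
      = posOf lst o t := by
    rw [PySem.Dict.getD_foldl_modify_append L PySem.Dict.empty t]
    rw [PySem.Dict.getD_empty]
    simpa using posOf_eq lst o ho t
  have hmem : t ∈ (lst.drop o) ↔ posOf lst o t ≠ [] := by
    constructor
    · intro hm hnil
      rw [List.mem_iff_getElem] at hm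
      obtain ⟨k, hk, hkt⟩ := hm
      have : ((o : Int) + k) ∈ posOf lst o t := by
        unfold posOf
        rw [List.mem_filter]
        constructor
        · rw [PySem.List.mem_pyRange_one]
          constructor
          · omega
          · have := lst.length_drop (i := o); omega
        · rw [PySem.List.pyGetD_of_nonneg _ _ (by omega)]
          simp only [List.getD]
          rw [show (((o : Int)) + (k : Int)).toNat = o + k from by omega]
          rw [← List.getElem?_drop, List.getElem?_eq_getElem hk, hkt]
          simp
      rw [hnil] at this
      simp at this
    · intro hne
      obtain ⟨i, hi⟩ := List.exists_mem_of_ne_nil _ hne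
      unfold posOf at hi
      rw [List.mem_filter, PySem.List.mem_pyRange_one] at hi
      obtain ⟨⟨hlo, hhi⟩, hcond⟩ := hi
      rw [PySem.List.pyGetD_of_nonneg _ _ (by omega)] at hcond
      have hti : lst.getD i.toNat 0 = t := by simpa using hcond
      have hlen : i.toNat < lst.length := by omega
      rw [List.mem_iff_getElem]
      refine ⟨i.toNat - o, by have := lst.length_drop (i := o); omega, ?_⟩
      have hidx : (List.drop o lst)[i.toNat - o]'(by have := lst.length_drop (i := o); omega)
          = lst[i.toNat]'hlen := by
        rw [List.getElem_drop]
        congr 1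
        omega
      rw [hidx]
      simp only [List.getD] at hti
      rw [List.getElem?_eq_getElem hlen] at hti
      simpa using hti
  by_cases hnil : posOf lst o t = []
  · rw [if_pos hnil]
    rw [PySem.Dict.get?_eq_none_iff_not_mem_keys, hkeys]
    rw [PySem.Set.mem_ofList]
    intro hm
    exact (hmem.mp hm) hnil
  · rw [if_neg hnil]
    have htk : t ∈ (L.foldl (fun d q => d.modify q.1 [] (fun l => l ++ [q.2])) PySem.Dict.empty).keys := by
      rw [hkeys, PySem.Set.mem_ofList]
      exact hmem.mpr hnil
    cases hg : (L.foldl (fun d q => d.modify q.1 [] (fun l => l ++ [q.2])) PySem.Dict.empty).get? t with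
    | none => rw [PySem.Dict.get?_eq_none_iff_not_mem_keys] at hg; exact absurd htk hg
    | some v =>
      rw [PySem.Dict.getD_eq_get?_getD, hg] at hgetD
      simp at hgetD
      rw [hgetD]
lemma step_facts (lst : List Int) (o : Nat) (ho : o ≤ lst.length) (t : Int)
    (swaps : List (Int × Int))
    (F : List Int) (hF : F = posOf lst o t)
    (e : Int) (he : e = (o : Int) + (F.length : Int))
    (AV B2s : List Int)
    (hAV : AV = (PySem.List.pyRange (o : Int) e).filter (fun i => PySem.List.pyGetD lst i 0 ≠ t))
    (hB2 : B2s = F.filter (fun i => (F.length : Int) + (o : Int) ≤ i)) :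
    swapLoopA ((PySem.List.pyRange (o : Int) ((F.length : Int) + (o : Int))).filter
          (fun i => !((PySem.Set.ofList F).contains i)))
        (PySem.List.enumerate B2s) swaps lst = applyPairs (AV.zip B2s) (swaps, lst)
    ∧ (fillBlock t F (PySem.List.pyRange (o : Int) e) (skipLt F e 0) swaps lst).1
        = (applyPairs (AV.zip B2s) (swaps, lst)).1
    ∧ (fillBlock t F (PySem.List.pyRange (o : Int) e) (skipLt F e 0) swaps lst).2.1
        = (applyPairs (AV.zip B2s) (swaps, lst)).2 := by
  -- basic facts about F
  have hcnt_le : F.length ≤ lst.length - o := by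
    have h1 := List.length_filter_le (fun i => PySem.List.pyGetD lst i 0 == t)
      (PySem.List.pyRange (o : Int) (lst.length : Int))
    rw [← posOf, ← hF] at h1
    rw [PySem.List.length_pyRange_one] at h1
    omega
  have he_le : e ≤ (lst.length : Int) := by omega
  have ho_le_e : (o : Int) ≤ e := by omega
  -- split the scan range at e
  have hsplit : PySem.List.pyRange (o : Int) (lst.length : Int)
      = PySem.List.pyRange (o : Int) e ++ PySem.List.pyRange e (lst.length : Int) :=
    PySem.List.pyRange_one_append _ _ _ ho_le_e he_le
  have hFdec : F = (PySem.List.pyRange (o : Int) e).filter (fun i => PySem.List.pyGetD lst i 0 == t)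
      ++ (PySem.List.pyRange e (lst.length : Int)).filter (fun i => PySem.List.pyGetD lst i 0 == t) := by
    rw [hF]; unfold posOf; rw [hsplit, List.filter_append]
  set B1 := (PySem.List.pyRange (o : Int) e).filter (fun i => PySem.List.pyGetD lst i 0 == t) with hB1def
  set B2 := (PySem.List.pyRange e (lst.length : Int)).filter (fun i => PySem.List.pyGetD lst i 0 == t) with hB2def
  have hB1lt : ∀ x ∈ B1, x < e := by
    intro x hx
    rw [hB1def, List.mem_filter, PySem.List.mem_pyRange_one] at hx
    exact hx.1.2
  have hB2ge : ∀ x ∈ B2, e ≤ x := by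
    intro x hx
    rw [hB2def, List.mem_filter, PySem.List.mem_pyRange_one] at hx
    exact hx.1.1
  -- A's "should" list is exactly B2
  have hshould : B2s = B2 := by
    rw [hB2]
    rw [List.filter_congr (q := fun i => decide (e ≤ i))
      (fun i _ => decide_eq_decide.mpr (by omega))]
    conv_lhs => rw [hFdec]
    rw [List.filter_append]
    have h1 : B1.filter (fun i => decide (e ≤ i)) = [] := by
      rw [List.filter_eq_nil_iff]
      intro x hx
      have := hB1lt x hx
      simp only [decide_eq_true_eq]
      omega
    have h2 : B2.filter (fun i => decide (e ≤ i)) = B2 := by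
      rw [List.filter_eq_self]
      intro x hx
      have := hB2ge x hx
      simp only [decide_eq_true_eq]
      omega
    rw [h1, h2, List.nil_append]
  -- skipLt lands at the start of B2
  have hskip : skipLt F e 0 = B1.length := by
    conv_lhs => rw [hFdec]
    exact skipLt_append B1 B2 e hB1lt hB2ge
  have hdropB1 : F.drop B1.length = B2 := by
    conv_lhs => rw [hFdec]
    exact List.drop_left
  -- A's avail list equals AV
  have havail : (PySem.List.pyRange (o : Int) ((F.length : Int) + (o : Int))).filter
      (fun i => !((PySem.Set.ofList F).contains i)) = AV := by
    rw [hAV, show ((F.length : Int) + (o : Int)) = e from by omega]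
    apply List.filter_congr
    intro x hx
    rw [PySem.List.mem_pyRange_one] at hx
    have hmemF : x ∈ F ↔ (PySem.List.pyGetD lst x 0 == t) = true := by
      constructor
      · intro hm
        rw [hF] at hm
        unfold posOf at hm
        exact (List.mem_filter.mp hm).2
      · intro hc
        rw [hF]
        unfold posOf
        rw [List.mem_filter, PySem.List.mem_pyRange_one]
        exact ⟨⟨hx.1, by omega⟩, hc⟩
    by_cases hc : PySem.List.pyGetD lst x 0 = t
    · have hin : (PySem.Set.ofList F).contains x = true := by
        rw [PySem.Set.contains_iff, PySem.Set.mem_ofList]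
        exact hmemF.mpr (by simp [hc])
      rw [hin]
      simp [hc]
    · have hnin : ¬ ((PySem.Set.ofList F).contains x = true) := by
        rw [PySem.Set.contains_iff, PySem.Set.mem_ofList]
        intro hm
        exact hc (by simpa using hmemF.mp hm)
      rw [Bool.not_eq_true] at hnin
      rw [hnin]
      simp [hc]
  -- lengths: AV and B2 have the same length
  have hblock_len : (PySem.List.pyRange (o : Int) e).length = F.length := by
    rw [PySem.List.length_pyRange_one]
    omega
  have hAVeq : AV = (PySem.List.pyRange (o : Int) e).filter
      (fun i => !(PySem.List.pyGetD lst i 0 == t)) := by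
    rw [hAV]
    apply List.filter_congr
    intro x _
    by_cases h : PySem.List.pyGetD lst x 0 = t <;> simp [h]
  have hlen_split : (PySem.List.pyRange (o : Int) e).length
      = B1.length + ((PySem.List.pyRange (o : Int) e).filter
          (fun i => !(PySem.List.pyGetD lst i 0 == t))).length := by
    rw [hB1def]
    exact List.length_eq_length_filter_add _
  have hFlen : F.length = B1.length + B2.length := by
    conv_lhs => rw [hFdec]
    exact List.length_append
  have hAVlen : AV.length = B2.length := by
    rw [hAVeq]
    omega
  -- the A-side loop
  have hA : swapLoopA ((PySem.List.pyRange (o : Int) ((F.length : Int) + (o : Int))).filter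
        (fun i => !((PySem.Set.ofList F).contains i)))
      (PySem.List.enumerate B2s) swaps lst = applyPairs (AV.zip B2s) (swaps, lst) := by
    rw [havail]
    have := swapLoopA_gen B2s [] AV swaps lst (by rw [hshould]; exact hAVlen)
    simpa using this
  -- the B-side loop
  have hBfacts := fillBlock_eq_applyPairs t F (PySem.List.pyRange (o : Int) e) B1.length swaps lst
    (PySem.List.pairwise_lt_pyRange_one _ _)
    (by intro x hx; rw [PySem.List.mem_pyRange_one] at hx; omega)
    (by
      intro p hp
      rw [hdropB1] at hp
      have hpe := hB2ge p hp
      refine ⟨by omega, ?_⟩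
      intro x hx
      rw [PySem.List.mem_pyRange_one] at hx
      omega)
    (by rw [hdropB1, ← hAV]; exact hAVlen)
  rw [hdropB1, ← hAV] at hBfacts
  rw [← hskip] at hBfacts
  rw [← hshould] at hBfacts
  exact ⟨hA, hBfacts.1, hBfacts.2⟩
lemma loopA_eq_loopS (els : List Int) :
    ∀ (lst : List Int) (o : Nat), o ≤ lst.length →
    ∀ (swaps offsets : List (Int × Int)),
    loopA els (buildPositions (PySem.List.slice lst (some (o : Int)) none) (o : Int))
        lst (o : Int) swaps offsets
      = loopS els lst (o : Int) swaps offsets := by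
  induction els with
  | nil => intro lst o ho swaps offsets; rfl
  | cons t rest ih =>
    intro lst o ho swaps offsets
    rw [loopA, loopS, buildPositions_get? lst o ho t]
    by_cases hnil : posOf lst o t = []
    · rw [if_pos hnil]
      show loopA rest _ lst (o : Int) swaps (offsets ++ [((o:Int), (o:Int))]) = _
      have hnil' : (PySem.List.pyRange ((o:Nat):Int) ((lst.length:Nat):Int)).filter
          (fun i => PySem.List.pyGetD lst i 0 == t) = [] := hnil
      have hrange0 : PySem.List.pyRange ((o:Nat):Int) ((o:Nat):Int) = [] := by
        rw [PySem.List.pyRange_one]; simp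
      have hskip0 : skipLt [] ((o:Nat):Int) 0 = 0 := by rw [skipLt]; simp
      simp only [hnil', List.length_nil, Nat.cast_zero, add_zero, hrange0, hskip0]
      show _ = loopS rest lst ((o:Nat):Int) swaps (offsets ++ [(((o:Nat):Int), ((o:Nat):Int))])
      exact ih lst o ho swaps (offsets ++ [(((o:Nat):Int), ((o:Nat):Int))])
    · rw [if_neg hnil]
      obtain ⟨hA, hB1, hB2⟩ := step_facts lst o ho t swaps (posOf lst o t) rfl
        ((o : Int) + ((posOf lst o t).length : Int)) rfl _ _ rfl rfl
      show loopA rest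
          (buildPositions
            (PySem.List.slice
              (swapLoopA
                ((PySem.List.pyRange (o : Int) (((posOf lst o t).length : Int) + (o : Int))).filter
                  (fun i => !((PySem.Set.ofList (posOf lst o t)).contains i)))
                (PySem.List.enumerate ((posOf lst o t).filter
                  (fun i => ((posOf lst o t).length : Int) + (o : Int) ≤ i)))
                swaps lst).2
              (some ((o : Int) + ((posOf lst o t).length : Int))))
            ((o : Int) + ((posOf lst o t).length : Int)))
          (swapLoopA
                ((PySem.List.pyRange (o : Int) (((posOf lst o t).length : Int) + (o : Int))).filter
                  (fun i => !((PySem.Set.ofList (posOf lst o t)).contains i)))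
                (PySem.List.enumerate ((posOf lst o t).filter
                  (fun i => ((posOf lst o t).length : Int) + (o : Int) ≤ i)))
                swaps lst).2
          ((o : Int) + ((posOf lst o t).length : Int))
          (swapLoopA
                ((PySem.List.pyRange (o : Int) (((posOf lst o t).length : Int) + (o : Int))).filter
                  (fun i => !((PySem.Set.ofList (posOf lst o t)).contains i)))
                (PySem.List.enumerate ((posOf lst o t).filter
                  (fun i => ((posOf lst o t).length : Int) + (o : Int) ≤ i)))
                swaps lst).1
          (offsets ++ [((o : Int), (o : Int) + ((posOf lst o t).length : Int))])
        = loopS rest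
          (fillBlock t (posOf lst o t)
            (PySem.List.pyRange (o : Int) ((o : Int) + ((posOf lst o t).length : Int)))
            (skipLt (posOf lst o t) ((o : Int) + ((posOf lst o t).length : Int)) 0)
            swaps lst).2.1
          ((o : Int) + ((posOf lst o t).length : Int))
          (fillBlock t (posOf lst o t)
            (PySem.List.pyRange (o : Int) ((o : Int) + ((posOf lst o t).length : Int)))
            (skipLt (posOf lst o t) ((o : Int) + ((posOf lst o t).length : Int)) 0)
            swaps lst).1
          (offsets ++ [((o : Int), (o : Int) + ((posOf lst o t).length : Int))])
      rw [hA, hB1, hB2]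
      have hcnt_le : (posOf lst o t).length ≤ lst.length - o := by
        have h1 := List.length_filter_le (fun i => PySem.List.pyGetD lst i 0 == t)
          (PySem.List.pyRange (o : Int) (lst.length : Int))
        rw [← posOf] at h1
        rw [PySem.List.length_pyRange_one] at h1
        omega
      have hcast : (((o + (posOf lst o t).length : Nat)) : Int)
          = (o : Int) + ((posOf lst o t).length : Int) := by push_cast; ring
      rw [← hcast]
      exact ih _ (o + (posOf lst o t).length) (by
        rw [length_applyPairs]
        show o + (posOf lst o t).length ≤ lst.length
        omega) _ _

-- ===== new lemmas for the B side =====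

lemma mem_posOf (lst : List Int) (o : Nat) (v x : Int) :
    x ∈ posOf lst o v ↔ (o : Int) ≤ x ∧ x < (lst.length : Int) ∧ PySem.List.pyGetD lst x 0 = v := by
  unfold posOf
  rw [List.mem_filter, PySem.List.mem_pyRange_one]
  simp [and_assoc]
lemma pairwise_posOf (lst : List Int) (o : Nat) (v : Int) :
    (posOf lst o v).Pairwise (· < ·) :=
  (PySem.List.pairwise_lt_pyRange_one _ _).filter _
lemma nodup_posOf (lst : List Int) (o : Nat) (v : Int) : (posOf lst o v).Nodup :=
  (pairwise_posOf lst o v).imp ne_of_lt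
lemma find?_filter_erase (k x : Int) (items : List (Int × PySem.Set Int)) :
    (items.filter (fun p => !(p.1 == k))).find? (fun p => p.1 == x)
      = if x = k then none else items.find? (fun p => p.1 == x) := by
  induction items with
  | nil => split_ifs <;> rfl
  | cons hd tl ih =>
    by_cases hk : hd.1 = k
    · rw [List.filter_cons_of_neg (by simp [hk])]
      rw [ih]
      by_cases hx : x = k
      · simp [hx]
      · rw [if_neg hx, if_neg hx]
        rw [List.find?_cons_of_neg (by simp; exact fun h => hx (by rw [← h, hk]))]
    · rw [List.filter_cons_of_pos (by simp [hk])]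
      by_cases hx : hd.1 = x
      · rw [List.find?_cons_of_pos (by simp [hx])]
        rw [List.find?_cons_of_pos (by simp [hx])]
        rw [if_neg (fun h => hk (hx.trans h))]
      · rw [List.find?_cons_of_neg (by simp [hx]),
            List.find?_cons_of_neg (by simp [hx]), ih]
lemma get?_erase (d : PySem.Dict Int (PySem.Set Int)) (k x : Int) :
    (d.erase k).get? x = if x = k then none else d.get? x := by
  have h := find?_filter_erase k x d.items
  show ((d.items.filter (fun p => !(p.1 == k))).find? (fun p => p.1 == x)).map (·.2)
      = if x = k then none else (d.items.find? (fun p => p.1 == x)).map (·.2)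
  rw [h]
  split_ifs <;> rfl
lemma getD_erase (d : PySem.Dict Int (PySem.Set Int)) (k x : Int) :
    (d.erase k).getD x [] = if x = k then [] else d.getD x [] := by
  rw [PySem.Dict.getD_eq_get?_getD, PySem.Dict.getD_eq_get?_getD, get?_erase]
  split_ifs <;> rfl
lemma pairwise_zip_lt (l1 l2 : List Int) (h1 : l1.Pairwise (· < ·)) (h2 : l2.Pairwise (· < ·)) :
    (l1.zip l2).Pairwise (fun x y => x.1 < y.1 ∧ x.2 < y.2) := by
  induction l1 generalizing l2 with
  | nil => simp
  | cons a l1 ih =>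
    cases l2 with
    | nil => simp
    | cons b l2 =>
      rw [List.zip_cons_cons, List.pairwise_cons]
      obtain ⟨ha, h1⟩ := List.pairwise_cons.mp h1
      obtain ⟨hb, h2⟩ := List.pairwise_cons.mp h2
      refine ⟨?_, ih l2 h1 h2⟩
      intro z hz
      obtain ⟨hz1, hz2⟩ := List.of_mem_zip hz
      exact ⟨ha _ hz1, hb _ hz2⟩
lemma mem_getD_foldl_add (L : List (Int × Int)) (d : PySem.Dict Int (PySem.Set Int)) (v x : Int) :
    x ∈ (L.foldl (fun d p => d.modify p.2 [] (fun s => PySem.Set.add s p.1)) d).getD v []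
      ↔ x ∈ d.getD v [] ∨ ∃ p ∈ L, p.2 = v ∧ p.1 = x := by
  induction L generalizing d with
  | nil => simp
  | cons hd tl ih =>
    rw [List.foldl_cons, ih]
    rw [PySem.Dict.getD_modify]
    by_cases hv : v = hd.2
    · subst hv
      rw [if_pos rfl, PySem.Set.mem_add]
      constructor
      · rintro ((h | h) | h)
        · exact Or.inl h
        · exact Or.inr ⟨hd, List.mem_cons_self, rfl, h.symm⟩
        · obtain ⟨p, hp, h⟩ := h
          exact Or.inr ⟨p, List.mem_cons_of_mem _ hp, h⟩
      · rintro (h | ⟨p, hp, h2, h3⟩)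
        · exact Or.inl (Or.inl h)
        · rcases List.mem_cons.mp hp with h | h
          · subst h
            exact Or.inl (Or.inr h3.symm)
          · exact Or.inr ⟨p, h, h2, h3⟩
    · rw [if_neg hv]
      constructor
      · rintro (h | ⟨p, hp, h2, h3⟩)
        · exact Or.inl h
        · exact Or.inr ⟨p, List.mem_cons_of_mem _ hp, h2, h3⟩
      · rintro (h | ⟨p, hp, h2, h3⟩)
        · exact Or.inl h
        · rcases List.mem_cons.mp hp with h | h
          · exact absurd (h ▸ h2) (fun he => hv he.symm)
          · exact Or.inr ⟨p, h, h2, h3⟩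
lemma nodup_getD_foldl_add (L : List (Int × Int)) (d : PySem.Dict Int (PySem.Set Int))
    (h : ∀ v, (d.getD v []).Nodup) (v : Int) :
    ((L.foldl (fun d p => d.modify p.2 [] (fun s => PySem.Set.add s p.1)) d).getD v []).Nodup := by
  induction L generalizing d with
  | nil => exact h v
  | cons hd tl ih =>
    rw [List.foldl_cons]
    apply ih
    intro w
    rw [PySem.Dict.getD_modify]
    split_ifs with hw
    · exact PySem.Set.nodup_add _ _ (h hd.2)
    · exact h w
lemma inv_buildIndex (lst : List Int) : DInv (buildIndex lst) lst 0 := by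
  intro v
  unfold buildIndex
  constructor
  · exact nodup_getD_foldl_add _ _ (fun w => by rw [PySem.Dict.getD_empty]; exact List.nodup_nil) v
  · intro x
    rw [mem_getD_foldl_add, PySem.Dict.getD_empty]
    simp only [List.not_mem_nil, false_or]
    rw [PySem.List.enumerate_eq_map_pyRange lst 0]
    rw [mem_posOf]
    constructor
    · rintro ⟨p, hp, h2, h3⟩
      obtain ⟨j, hj, rfl⟩ := List.mem_map.mp hp
      rw [PySem.List.mem_pyRange_one, PySem.List.len_eq] at hj
      subst h3
      exact ⟨by omega, by omega, h2⟩
    · rintro ⟨h1, h2, h3⟩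
      refine ⟨(x, PySem.List.pyGetD lst x 0), List.mem_map.mpr ⟨x, ?_, rfl⟩, h3, rfl⟩
      rw [PySem.List.mem_pyRange_one, PySem.List.len_eq]
      omega
lemma pyGetD_pySwap_left (lst : List Int) (a b : Int) (ha : 0 ≤ a) (hab : a ≠ b)
    (halen : a < (lst.length : Int)) (hb : 0 ≤ b) :
    PySem.List.pyGetD (pySwap lst a b) a 0 = PySem.List.pyGetD lst b 0 := by
  have hna : a.toNat ≠ b.toNat := fun h => hab (by omega)
  simp only [pySwap, PySem.List.pySetD_of_nonneg _ _ ha, PySem.List.pySetD_of_nonneg _ _ hb,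
    PySem.List.pyGetD_of_nonneg _ _ ha]
  unfold List.getD
  rw [List.getElem?_set_ne hna.symm, List.getElem?_set_self (by omega)]
  rfl
lemma pyGetD_pySwap_right (lst : List Int) (a b : Int) (ha : 0 ≤ a) (halen : a < (lst.length : Int))
    (hb : 0 ≤ b) (hblen : b < (lst.length : Int)) :
    PySem.List.pyGetD (pySwap lst a b) b 0 = PySem.List.pyGetD lst a 0 := by
  simp only [pySwap, PySem.List.pySetD_of_nonneg _ _ ha, PySem.List.pySetD_of_nonneg _ _ hb,
    PySem.List.pyGetD_of_nonneg _ _ hb]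
  unfold List.getD
  rw [List.getElem?_set_self (by rw [List.length_set]; omega)]
  rfl
lemma innerB_eq (k : Nat) (pos movers : List Int) :
    ∀ (is : List Int) (j ti : Nat) (swaps : List (Int × Int)) (lst : List Int)
      (d : PySem.Dict Int (PySem.Set Int)),
    is.Pairwise (· < ·) →
    j ≤ k → k ≤ pos.length →
    pos.Pairwise (· < ·) →
    (∀ q ∈ (pos.take k).drop j, q ∈ is) →
    (is.filter (fun s => decide (s ∉ (pos.take k).drop j))).length = movers.length - ti →
    ti ≤ movers.length →
    innerB k pos movers is j ti swaps lst d
      = applyPairsD ((is.filter (fun s => decide (s ∉ (pos.take k).drop j))).zip (movers.drop ti))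
          (swaps, lst, d) := by
  intro is
  induction is with
  | nil =>
    intro j ti swaps lst d _ _ _ _ _ _ _
    simp only [List.filter_nil, List.zip_nil_left]
    rfl
  | cons slot rest ih =>
    intro j ti swaps lst d hpw hjk0 hk hpos hD hlen hti
    have htklen : (pos.take k).length = k := by rw [List.length_take]; omega
    have hpwD : ((pos.take k).drop j).Pairwise (· < ·) :=
      List.Pairwise.sublist ((List.drop_sublist _ _).trans (List.take_sublist _ _)) hpos
    have hslot_lt : ∀ x ∈ rest, slot < x := (List.pairwise_cons.mp hpw).1
    by_cases hc : j < k ∧ PySem.List.pyGetD pos (j : Int) 0 = slot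
    · -- Python skips this slot: it already holds the target
      obtain ⟨hjk, hpj⟩ := hc
      have hjlt : j < pos.length := lt_of_lt_of_le hjk hk
      have hget : PySem.List.pyGetD pos (j : Int) 0 = pos[j] := by
        rw [PySem.List.pyGetD_of_nonneg _ _ (by omega)]
        simp [List.getD, List.getElem?_eq_getElem hjlt]
      have hsl : slot = pos[j] := by rw [← hpj, hget]
      have hjlt' : j < (pos.take k).length := by omega
      have hdropj : (pos.take k).drop j = pos[j] :: (pos.take k).drop (j + 1) := by
        rw [List.drop_eq_getElem_cons hjlt']
        congr 1
        exact List.getElem_take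
      have hhead : ∀ q ∈ (pos.take k).drop (j + 1), pos[j] < q := by
        intro q hq
        have := hpwD
        rw [hdropj, List.pairwise_cons] at this
        exact this.1 q hq
      have hfilter_head : ((slot :: rest).filter (fun s => decide (s ∉ (pos.take k).drop j)))
          = rest.filter (fun s => decide (s ∉ (pos.take k).drop j)) := by
        rw [List.filter_cons_of_neg (by
          simp only [decide_eq_true_eq, not_not]
          rw [hdropj, hsl]
          exact List.mem_cons_self)]
      have hcong : rest.filter (fun s => decide (s ∉ (pos.take k).drop j))
          = rest.filter (fun s => decide (s ∉ (pos.take k).drop (j + 1))) := by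
        apply List.filter_congr
        intro x hx
        rw [decide_eq_decide, hdropj, List.mem_cons, not_or]
        have : x ≠ pos[j] := by have := hslot_lt x hx; omega
        tauto
      rw [innerB, if_pos ⟨hjk, hpj⟩, hfilter_head, hcong]
      exact ih (j + 1) ti swaps lst d (List.pairwise_cons.mp hpw).2 (by omega) hk hpos
        (by
          intro q hq
          have hqis : q ∈ slot :: rest := hD q (by rw [hdropj]; exact List.mem_cons_of_mem _ hq)
          have : slot < q := by have := hhead q hq; omega
          rcases List.mem_cons.mp hqis with h | h
          · omega
          · exact h)
        (by rw [← hcong, ← hfilter_head]; exact hlen) hti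
    · -- Python swaps: this slot needs a target from outside the block
      have hnot : slot ∉ (pos.take k).drop j := by
        intro hmem
        have hjk : j < k := by
          by_contra h
          rw [List.drop_eq_nil_of_le (by omega)] at hmem
          simp at hmem
        have hjlt : j < pos.length := lt_of_lt_of_le hjk hk
        have hjlt' : j < (pos.take k).length := by omega
        have hget : PySem.List.pyGetD pos (j : Int) 0 = pos[j] := by
          rw [PySem.List.pyGetD_of_nonneg _ _ (by omega)]
          simp [List.getD, List.getElem?_eq_getElem hjlt]
        have hdropj : (pos.take k).drop j = pos[j] :: (pos.take k).drop (j + 1) := by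
          rw [List.drop_eq_getElem_cons hjlt']
          congr 1
          exact List.getElem_take
        rw [hdropj, List.mem_cons] at hmem
        rcases hmem with h | h
        · exact hc ⟨hjk, by rw [hget, ← h]⟩
        · -- slot strictly above pos[j], yet pos[j] must sit in the (ascending) remaining slots
          have h1 : pos[j] < slot := by
            have := hpwD
            rw [hdropj, List.pairwise_cons] at this
            exact this.1 slot h
          have h2 : pos[j] ∈ slot :: rest := hD pos[j] (by rw [hdropj]; exact List.mem_cons_self)
          rcases List.mem_cons.mp h2 with h' | h'
          · omega
          · have := hslot_lt _ h'
            omega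
      have hfilter_head : ((slot :: rest).filter (fun s => decide (s ∉ (pos.take k).drop j)))
          = slot :: rest.filter (fun s => decide (s ∉ (pos.take k).drop j)) := by
        rw [List.filter_cons_of_pos (by simpa using hnot)]
      have htilt : ti < movers.length := by
        rw [hfilter_head] at hlen
        simp only [List.length_cons] at hlen
        omega
      have hmv : movers.drop ti = movers[ti] :: movers.drop (ti + 1) :=
        List.drop_eq_getElem_cons htilt
      have hpget : PySem.List.pyGetD movers (ti : Int) 0 = movers[ti] := by
        rw [PySem.List.pyGetD_of_nonneg _ _ (by omega)]
        simp [List.getD, List.getElem?_eq_getElem htilt]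
      rw [innerB, if_neg hc, hfilter_head, hmv, List.zip_cons_cons]
      have happ : applyPairsD ((slot, movers[ti])
              :: (rest.filter (fun s => decide (s ∉ (pos.take k).drop j))).zip (movers.drop (ti + 1)))
            (swaps, lst, d)
          = applyPairsD ((rest.filter (fun s => decide (s ∉ (pos.take k).drop j))).zip (movers.drop (ti + 1)))
            (swaps ++ [(slot, movers[ti])], pySwap lst slot movers[ti],
              d.modify (PySem.List.pyGetD lst slot 0) []
                (fun s => PySem.Set.add (PySem.Set.discard s slot) movers[ti])) := rfl
      rw [happ, hpget]
      exact ih j (ti + 1) _ _ _ (List.pairwise_cons.mp hpw).2 hjk0 hk hpos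
        (by
          intro q hq
          have hqis := hD q hq
          rcases List.mem_cons.mp hqis with h | h
          · exact absurd (h ▸ hq) hnot
          · exact h)
        (by
          rw [hfilter_head] at hlen
          simp only [List.length_cons] at hlen
          omega) (by omega)
lemma applyPairsD_proj (ps : List (Int × Int)) (swaps : List (Int × Int)) (lst : List Int)
    (d : PySem.Dict Int (PySem.Set Int)) :
    (applyPairsD ps (swaps, lst, d)).1 = (applyPairs ps (swaps, lst)).1
      ∧ (applyPairsD ps (swaps, lst, d)).2.1 = (applyPairs ps (swaps, lst)).2 := by
  induction ps generalizing swaps lst d with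
  | nil => exact ⟨rfl, rfl⟩
  | cons z ps ih =>
    show (applyPairsD ps _).1 = (applyPairs ps _).1 ∧ (applyPairsD ps _).2.1 = (applyPairs ps _).2
    exact ih _ _ _
lemma length_pySwap (lst : List Int) (a b : Int) : (pySwap lst a b).length = lst.length := by
  simp [pySwap, PySem.List.length_pySetD]
lemma applyPairsD_facts (t : Int) (oN : Nat) (e : Int) (hoe : (oN : Int) ≤ e) :
    ∀ (Z : List (Int × Int)) (swaps : List (Int × Int)) (lst : List Int)
      (d : PySem.Dict Int (PySem.Set Int)),
    (∀ z ∈ Z, (oN : Int) ≤ z.1 ∧ z.1 < e ∧ e ≤ z.2 ∧ z.2 < (lst.length : Int)) →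
    Z.Pairwise (fun x y => x.1 < y.1 ∧ x.2 < y.2) →
    (∀ z ∈ Z, PySem.List.pyGetD lst z.1 0 ≠ t ∧ PySem.List.pyGetD lst z.2 0 = t) →
    (∀ v, v ≠ t → ((d.getD v []).Nodup ∧ ∀ x, (x ∈ d.getD v [] ↔ x ∈ posOf lst oN v))) →
    (applyPairsD Z (swaps, lst, d)).2.1.length = lst.length
    ∧ (∀ x : Int, 0 ≤ x → (∀ z ∈ Z, x ≠ z.1 ∧ x ≠ z.2) →
        PySem.List.pyGetD (applyPairsD Z (swaps, lst, d)).2.1 x 0 = PySem.List.pyGetD lst x 0)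
    ∧ (∀ z ∈ Z, PySem.List.pyGetD (applyPairsD Z (swaps, lst, d)).2.1 z.1 0 = t
        ∧ PySem.List.pyGetD (applyPairsD Z (swaps, lst, d)).2.1 z.2 0 ≠ t)
    ∧ (∀ v, v ≠ t → (((applyPairsD Z (swaps, lst, d)).2.2.getD v []).Nodup
        ∧ ∀ x, (x ∈ (applyPairsD Z (swaps, lst, d)).2.2.getD v []
            ↔ x ∈ posOf (applyPairsD Z (swaps, lst, d)).2.1 oN v)))
    ∧ (applyPairsD Z (swaps, lst, d)).2.2.getD t [] = d.getD t [] := by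
  intro Z
  induction Z with
  | nil =>
    intro swaps lst d _ _ _ hinv
    exact ⟨rfl, fun x _ _ => rfl, by simp, hinv, rfl⟩
  | cons z Z ih =>
    intro swaps lst d hbnd hpwz hval hinv
    obtain ⟨a, b⟩ := z
    obtain ⟨ha1, ha2, hb1, hb2⟩ := hbnd (a, b) List.mem_cons_self
    obtain ⟨hva, hvb⟩ := hval (a, b) List.mem_cons_self
    obtain ⟨hz, hpwz'⟩ := List.pairwise_cons.mp hpwz
    have ha0 : (0 : Int) ≤ a := le_trans (by omega) ha1
    have hb0 : (0 : Int) ≤ b := le_trans (by omega) hb1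
    have hab : a ≠ b := by omega
    have halen : a < (lst.length : Int) := by omega
    set v := PySem.List.pyGetD lst a 0 with hvdef
    set lst1 := pySwap lst a b with hlst1
    set d1 := d.modify v [] (fun s => PySem.Set.add (PySem.Set.discard s a) b) with hd1
    have hred : applyPairsD ((a, b) :: Z) (swaps, lst, d)
        = applyPairsD Z (swaps ++ [(a, b)], lst1, d1) := rfl
    have hlen1 : lst1.length = lst.length := length_pySwap lst a b
    have hget1a : PySem.List.pyGetD lst1 a 0 = t := by
      rw [hlst1, pyGetD_pySwap_left lst a b ha0 hab halen hb0]
      exact hvb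
    have hget1b : PySem.List.pyGetD lst1 b 0 = v := by
      rw [hlst1, pyGetD_pySwap_right lst a b ha0 halen hb0 hb2]
    have hget1ne : ∀ x : Int, 0 ≤ x → x ≠ a → x ≠ b →
        PySem.List.pyGetD lst1 x 0 = PySem.List.pyGetD lst x 0 := by
      intro x hx hxa hxb
      exact pyGetD_pySwap_ne lst a b x hx hxa hxb ha0 hb0
    -- invariant after the single swap
    have hinv1 : ∀ w, w ≠ t → ((d1.getD w []).Nodup
        ∧ ∀ x, (x ∈ d1.getD w [] ↔ x ∈ posOf lst1 oN w)) := by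
      intro w hw
      have hv' : v ≠ t := hva
      by_cases hwv : w = v
      · have hgd : d1.getD w [] = PySem.Set.add (PySem.Set.discard (d.getD v []) a) b := by
          rw [hd1, PySem.Dict.getD_modify, if_pos hwv]
        constructor
        · rw [hgd]
          exact PySem.Set.nodup_add _ _ (PySem.Set.nodup_discard _ _ (hinv v hv').1)
        · intro x
          rw [hgd, PySem.Set.mem_add, PySem.Set.mem_discard, (hinv v hv').2 x, hwv]
          rw [mem_posOf, mem_posOf, hlen1]
          constructor
          · rintro (⟨⟨hx1, hx2, hx3⟩, hxa⟩ | rfl)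
            · have hxb : x ≠ b := by
                intro h
                rw [h] at hx3
                rw [hx3] at hvb
                exact hv' hvb
              refine ⟨hx1, hx2, ?_⟩
              rw [hget1ne x (by omega) hxa hxb]
              exact hx3
            · exact ⟨by omega, by omega, hget1b⟩
          · rintro ⟨hx1, hx2, hx3⟩
            by_cases hxb : x = b
            · exact Or.inr hxb
            · have hxa : x ≠ a := by
                intro h
                rw [h, hget1a] at hx3
                exact hv' hx3.symm
              refine Or.inl ⟨⟨hx1, hx2, ?_⟩, hxa⟩
              rw [← hget1ne x (by omega) hxa hxb]
              exact hx3
      · have hgd : d1.getD w [] = d.getD w [] := by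
          rw [hd1, PySem.Dict.getD_modify, if_neg hwv]
        constructor
        · rw [hgd]; exact (hinv w hw).1
        · intro x
          rw [hgd, (hinv w hw).2 x]
          rw [mem_posOf, mem_posOf, hlen1]
          by_cases hx0 : (0 : Int) ≤ x
          · by_cases hxa : x = a
            · subst hxa
              constructor
              · rintro ⟨_, _, hval'⟩
                exact absurd hval'.symm hwv
              · rintro ⟨_, _, hval'⟩
                rw [hget1a] at hval'
                exact absurd hval'.symm hw
            · by_cases hxb : x = b
              · subst hxb
                constructor
                · rintro ⟨_, _, hval'⟩
                  rw [hval'] at hvb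
                  exact absurd hvb hw
                · rintro ⟨_, _, hval'⟩
                  rw [hget1b] at hval'
                  exact absurd hval'.symm hwv
              · rw [hget1ne x hx0 hxa hxb]
          · constructor
            · rintro ⟨h, _⟩; omega
            · rintro ⟨h, _⟩; omega
    have hval1 : ∀ z ∈ Z, PySem.List.pyGetD lst1 z.1 0 ≠ t ∧ PySem.List.pyGetD lst1 z.2 0 = t := by
      intro z hzm
      obtain ⟨hlt1, hlt2⟩ := hz z hzm
      obtain ⟨h1, h2, h3, h4⟩ := hbnd z (List.mem_cons_of_mem _ hzm)
      rw [hget1ne z.1 (by omega) (by omega) (by omega), hget1ne z.2 (by omega) (by omega) (by omega)]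
      exact hval z (List.mem_cons_of_mem _ hzm)
    have hbnd1 : ∀ z ∈ Z, (oN : Int) ≤ z.1 ∧ z.1 < e ∧ e ≤ z.2 ∧ z.2 < (lst1.length : Int) := by
      intro z hzm
      rw [hlen1]
      exact hbnd z (List.mem_cons_of_mem _ hzm)
    obtain ⟨c5, c1, c2, c3, c4⟩ := ih (swaps ++ [(a, b)]) lst1 d1 hbnd1 hpwz' hval1 hinv1
    rw [hred]
    refine ⟨by rw [c5, hlen1], ?_, ?_, c3, ?_⟩
    · intro x hx0 hxz
      obtain ⟨hxa, hxb⟩ := hxz (a, b) List.mem_cons_self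
      rw [c1 x hx0 (fun z hzm => hxz z (List.mem_cons_of_mem _ hzm)), hget1ne x hx0 hxa hxb]
    · intro z hzm
      rcases List.mem_cons.mp hzm with h | h
      · subst h
        constructor
        · rw [c1 a ha0 (by
            intro z' hz'
            obtain ⟨hlt1, hlt2⟩ := hz z' hz'
            obtain ⟨h1, h2, h3, h4⟩ := hbnd z' (List.mem_cons_of_mem _ hz')
            constructor <;> omega)]
          exact hget1a
        · rw [c1 b hb0 (by
            intro z' hz'
            obtain ⟨hlt1, hlt2⟩ := hz z' hz'
            obtain ⟨h1, h2, h3, h4⟩ := hbnd z' (List.mem_cons_of_mem _ hz')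
            constructor <;> omega)]
          rw [hget1b]
          exact hva
      · exact c2 z h
    · rw [c4, hd1, PySem.Dict.getD_modify, if_neg (fun h : t = v => hva h.symm)]
lemma loopB_eq_loopS (els : List Int) :
    ∀ (lst : List Int) (o : Nat), o ≤ lst.length →
    ∀ (d : PySem.Dict Int (PySem.Set Int)), DInv d lst o →
    ∀ (swaps offsets : List (Int × Int)),
    loopB els d lst (o : Int) swaps offsets = loopS els lst (o : Int) swaps offsets := by
  induction els with
  | nil => intro lst o ho d hInv swaps offsets; rfl
  | cons t rest ih =>
    intro lst o ho d hInv swaps offsets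
    have hnodupF := nodup_posOf lst o t
    have hpwF := pairwise_posOf lst o t
    have hsorted : PySem.List.sorted (d.getD t []) (fun x => x) false = posOf lst o t :=
      PySem.List.sorted_eq_of_perm_of_pairwise_lt (d.getD t []) (posOf lst o t) (fun x => x)
        ((List.perm_ext_iff_of_nodup hnodupF (hInv t).1).mpr (fun x => ((hInv t).2 x).symm)) hpwF
    rw [loopB, loopS, hsorted]
    have hPfold : (PySem.List.pyRange ((o : Nat) : Int) ((lst.length : Nat) : Int)).filter
        (fun i => PySem.List.pyGetD lst i 0 == t) = posOf lst o t := rfl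
    rw [hPfold]
    set F := posOf lst o t with hFdef
    have hcnt_le : F.length ≤ lst.length - o := by
      have h1 := List.length_filter_le (fun i => PySem.List.pyGetD lst i 0 == t)
        (PySem.List.pyRange (o : Int) (lst.length : Int))
      rw [← posOf, ← hFdef] at h1
      rw [PySem.List.length_pyRange_one] at h1
      omega
    set e : Int := ((o : Nat) : Int) + ((F.length : Nat) : Int) with hedef
    have ho_le_e : ((o : Nat) : Int) ≤ e := by omega
    have he_le : e ≤ (lst.length : Int) := by omega
    have hsplit : PySem.List.pyRange (o : Int) (lst.length : Int)
        = PySem.List.pyRange (o : Int) e ++ PySem.List.pyRange e (lst.length : Int) :=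
      PySem.List.pyRange_one_append _ _ _ ho_le_e he_le
    set B1 := (PySem.List.pyRange (o : Int) e).filter
      (fun i => PySem.List.pyGetD lst i 0 == t) with hB1def
    set B2 := (PySem.List.pyRange e (lst.length : Int)).filter
      (fun i => PySem.List.pyGetD lst i 0 == t) with hB2def
    have hFdec : F = B1 ++ B2 := by
      rw [hFdef]
      show posOf lst o t = _
      unfold posOf
      rw [hsplit, List.filter_append]
    have hB1lt : ∀ x ∈ B1, x < e := by
      intro x hx
      rw [hB1def, List.mem_filter, PySem.List.mem_pyRange_one] at hx
      exact hx.1.2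
    have hB2ge : ∀ x ∈ B2, e ≤ x ∧ x < (lst.length : Int) ∧ PySem.List.pyGetD lst x 0 = t := by
      intro x hx
      rw [hB2def, List.mem_filter, PySem.List.mem_pyRange_one] at hx
      exact ⟨hx.1.1, hx.1.2, by simpa using hx.2⟩
    have hskip : skipLt F e 0 = B1.length := by
      conv_lhs => rw [hFdec]
      exact skipLt_append B1 B2 e hB1lt (fun x hx => (hB2ge x hx).1)
    have htake : F.take (skipLt F e 0) = B1 := by
      rw [hskip]
      conv_lhs => rw [hFdec]
      exact List.take_left
    have hdropB1 : F.drop (skipLt F e 0) = B2 := by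
      rw [hskip]
      conv_lhs => rw [hFdec]
      exact List.drop_left
    have hmovers : PySem.List.slice F (some ((skipLt F e 0 : Nat) : Int)) none = B2 := by
      rw [PySem.List.slice_from_natCast]
      exact hdropB1
    set AV := (PySem.List.pyRange (o : Int) e).filter
      (fun i => PySem.List.pyGetD lst i 0 ≠ t) with hAVdef
    have hAVmem : ∀ x ∈ AV, (o : Int) ≤ x ∧ x < e ∧ PySem.List.pyGetD lst x 0 ≠ t := by
      intro x hx
      rw [hAVdef, List.mem_filter, PySem.List.mem_pyRange_one] at hx
      exact ⟨hx.1.1, hx.1.2, by simpa using hx.2⟩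
    have hAVeq' : AV = (PySem.List.pyRange (o : Int) e).filter
        (fun i => !(PySem.List.pyGetD lst i 0 == t)) := by
      rw [hAVdef]
      apply List.filter_congr
      intro x _
      by_cases h : PySem.List.pyGetD lst x 0 = t <;> simp [h]
    have hblock_len : (PySem.List.pyRange (o : Int) e).length = F.length := by
      rw [PySem.List.length_pyRange_one]
      omega
    have hFlen : F.length = B1.length + B2.length := by
      conv_lhs => rw [hFdec]
      exact List.length_append
    have hAVlen : AV.length = B2.length := by
      have := List.length_eq_length_filter_add
        (l := PySem.List.pyRange (o : Int) e) (fun i => PySem.List.pyGetD lst i 0 == t)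
      rw [← hB1def, ← hAVeq'] at this
      omega
    have hfiltereq : (PySem.List.pyRange (o : Int) e).filter
        (fun s => decide (s ∉ (F.take (skipLt F e 0)).drop 0)) = AV := by
      rw [List.drop_zero, htake, hAVdef]
      apply List.filter_congr
      intro x hx
      rw [decide_eq_decide]
      constructor
      · intro hnb
        simp only [ne_eq]
        intro hval
        exact hnb (by rw [hB1def, List.mem_filter]; exact ⟨hx, by simp [hval]⟩)
      · intro hnv hmem
        rw [hB1def, List.mem_filter] at hmem
        simp only [ne_eq] at hnv
        exact hnv (by simpa using hmem.2)
    have hB1sub : ∀ q ∈ B1, q ∈ PySem.List.pyRange (o : Int) e := by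
      intro q hq
      rw [hB1def, List.mem_filter] at hq
      exact hq.1
    -- the fused loop is the swap fold
    have hinner : innerB (skipLt F e 0) F B2 (PySem.List.pyRange (o : Int) e) 0 0 swaps lst (d.erase t)
        = applyPairsD (AV.zip B2) (swaps, lst, d.erase t) := by
      have h := innerB_eq (skipLt F e 0) F B2 (PySem.List.pyRange (o : Int) e) 0 0 swaps lst (d.erase t)
        (PySem.List.pairwise_lt_pyRange_one _ _)
        (Nat.zero_le _)
        (by rw [hskip]; omega)
        hpwF
        (by
          intro q hq
          rw [List.drop_zero, htake] at hq
          exact hB1sub q hq)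
        (by rw [hfiltereq, hAVlen]; omega)
        (Nat.zero_le _)
      rw [hfiltereq, List.drop_zero] at h
      exact h
    -- the reference round equals the same fold
    have hshould : F.filter (fun i => (F.length : Int) + (o : Int) ≤ i) = B2 := by
      rw [List.filter_congr (q := fun i => decide (e ≤ i))
        (fun i _ => decide_eq_decide.mpr (by omega))]
      conv_lhs => rw [hFdec]
      rw [List.filter_append]
      have h1 : B1.filter (fun i => decide (e ≤ i)) = [] := by
        rw [List.filter_eq_nil_iff]
        intro x hx
        have := hB1lt x hx
        simp only [decide_eq_true_eq]
        omega
      have h2 : B2.filter (fun i => decide (e ≤ i)) = B2 := by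
        rw [List.filter_eq_self]
        intro x hx
        have := (hB2ge x hx).1
        simp only [decide_eq_true_eq]
        omega
      rw [h1, h2, List.nil_append]
    obtain ⟨_, hfb1, hfb2⟩ := step_facts lst o ho t swaps F hFdef e hedef AV
      (F.filter (fun i => (F.length : Int) + (o : Int) ≤ i)) hAVdef rfl
    rw [hshould] at hfb1 hfb2
    obtain ⟨hproj1, hproj2⟩ := applyPairsD_proj (AV.zip B2) swaps lst (d.erase t)
    -- the dict invariant survives the round
    have herase_t : (d.erase t).getD t [] = [] := by
      rw [getD_erase, if_pos rfl]
    have herase_ne : ∀ v : Int, v ≠ t → (d.erase t).getD v [] = d.getD v [] := by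
      intro v hv
      rw [getD_erase, if_neg hv]
    have hZmem : ∀ z ∈ AV.zip B2, z.1 ∈ AV ∧ z.2 ∈ B2 := fun z hz => List.of_mem_zip hz
    have hAVpw : AV.Pairwise (· < ·) :=
      List.Pairwise.sublist (List.filter_sublist ..) (PySem.List.pairwise_lt_pyRange_one _ _)
    have hB2pw : B2.Pairwise (· < ·) :=
      List.Pairwise.sublist (List.filter_sublist ..) (PySem.List.pairwise_lt_pyRange_one _ _)
    obtain ⟨c5, c1, c2, c3, c4⟩ := applyPairsD_facts t o e ho_le_e (AV.zip B2) swaps lst (d.erase t)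
      (by
        intro z hz
        obtain ⟨h1, h2⟩ := hZmem z hz
        obtain ⟨ha1, ha2, _⟩ := hAVmem z.1 h1
        obtain ⟨hb1, hb2, _⟩ := hB2ge z.2 h2
        exact ⟨ha1, ha2, hb1, hb2⟩)
      (pairwise_zip_lt AV B2 hAVpw hB2pw)
      (by
        intro z hz
        obtain ⟨h1, h2⟩ := hZmem z hz
        exact ⟨(hAVmem z.1 h1).2.2, (hB2ge z.2 h2).2.2⟩)
      (by
        intro v hv
        rw [herase_ne v hv]
        exact ⟨(hInv v).1, (hInv v).2⟩)
    have hmem_fst : ∀ x ∈ AV, ∃ z ∈ AV.zip B2, z.1 = x := by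
      intro x hx
      have := List.map_fst_zip (l₁ := AV) (l₂ := B2) (by omega)
      rw [← this] at hx
      obtain ⟨z, hz, hzx⟩ := List.mem_map.mp hx
      exact ⟨z, hz, hzx⟩
    have hmem_snd : ∀ x ∈ B2, ∃ z ∈ AV.zip B2, z.2 = x := by
      intro x hx
      have := List.map_snd_zip (l₁ := AV) (l₂ := B2) (by omega)
      rw [← this] at hx
      obtain ⟨z, hz, hzx⟩ := List.mem_map.mp hx
      exact ⟨z, hz, hzx⟩
    set L' := (applyPairsD (AV.zip B2) (swaps, lst, d.erase t)).2.1 with hL'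
    set D' := (applyPairsD (AV.zip B2) (swaps, lst, d.erase t)).2.2 with hD'
    -- every block slot holds t afterwards
    have hblockt : ∀ x : Int, (o : Int) ≤ x → x < e → PySem.List.pyGetD L' x 0 = t := by
      intro x hx1 hx2
      by_cases hxa : x ∈ AV
      · obtain ⟨z, hz, hzx⟩ := hmem_fst x hxa
        rw [← hzx]
        exact (c2 z hz).1
      · have hxt : PySem.List.pyGetD lst x 0 = t := by
          by_contra hne
          exact hxa (by
            rw [hAVdef, List.mem_filter, PySem.List.mem_pyRange_one]
            exact ⟨⟨hx1, hx2⟩, by simpa using hne⟩)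
        rw [c1 x (by omega) (by
          intro z hz
          obtain ⟨h1, h2⟩ := hZmem z hz
          refine ⟨fun h => hxa (h ▸ h1), ?_⟩
          have := (hB2ge z.2 h2).1
          omega)]
        exact hxt
    -- nothing at or beyond the new offset holds t afterwards
    have hnot : ∀ x : Int, e ≤ x → x < (lst.length : Int) → PySem.List.pyGetD L' x 0 ≠ t := by
      intro x hx1 hx2
      by_cases hxb : x ∈ B2
      · obtain ⟨z, hz, hzx⟩ := hmem_snd x hxb
        rw [← hzx]
        exact (c2 z hz).2
      · have huntouched : ∀ z ∈ AV.zip B2, x ≠ z.1 ∧ x ≠ z.2 := by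
          intro z hz
          obtain ⟨h1, h2⟩ := hZmem z hz
          refine ⟨?_, fun h => hxb (h ▸ h2)⟩
          have := (hAVmem z.1 h1).2.1
          omega
        rw [c1 x (by omega) huntouched]
        intro hxt
        have hxF : x ∈ F := by
          rw [hFdef, mem_posOf]
          exact ⟨by omega, hx2, hxt⟩
        rw [hFdec, List.mem_append] at hxF
        rcases hxF with h | h
        · have := hB1lt x h
          omega
        · exact hxb h
    have hlenL' : L'.length = lst.length := c5
    have hInv' : DInv D' L' (o + F.length) := by
      intro v
      by_cases hv : v = t
      · subst hv
        rw [hD', c4, herase_t]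
        refine ⟨List.nodup_nil, ?_⟩
        intro x
        simp only [List.not_mem_nil, false_iff]
        intro hx
        rw [mem_posOf, hlenL'] at hx
        obtain ⟨hx1, hx2, hx3⟩ := hx
        exact hnot x (by push_cast at hx1 ⊢; omega) hx2 hx3
      · obtain ⟨hn, hm⟩ := c3 v hv
        refine ⟨hn, ?_⟩
        intro x
        rw [hm x, mem_posOf, mem_posOf, hlenL']
        constructor
        · rintro ⟨h1, h2, h3⟩
          refine ⟨?_, h2, h3⟩
          push_cast
          by_contra hlt
          have hxe : x < e := by push_cast at hlt; omega
          rw [hblockt x h1 hxe] at h3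
          exact hv h3.symm
        · rintro ⟨h1, h2, h3⟩
          exact ⟨by push_cast at h1 ⊢; omega, h2, h3⟩
    have hcast : (((o + F.length : Nat)) : Int) = e := by
      rw [hedef]; push_cast; ring
    rw [hmovers, hinner]
    rw [hfb1, hfb2, ← hproj1, ← hproj2]
    have hgoal := ih L' (o + F.length) (by rw [hlenL']; omega) D' hInv'
      (applyPairsD (AV.zip B2) (swaps, lst, d.erase t)).1 (offsets ++ [((o : Int), e)])
    rw [hcast] at hgoal
    exact hgoal
-- ===== VERDICT (by name: the statement is the Claim_ definition above) =====
theorem min_swaps_to_target_fast_spec : Claim_equal_min_swaps_to_target_fast := by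
  intro lst elements _
  show _ = _
  unfold min_swaps_to_target_fast min_swaps_to_target_fast_alt
  have hA := loopA_eq_loopS elements lst 0 (Nat.zero_le _) [] []
  have hB := loopB_eq_loopS elements lst 0 (Nat.zero_le _) (buildIndex lst) (inv_buildIndex lst) [] []
  simp only [Nat.cast_zero] at hA hB
  have hsl : PySem.List.slice lst (some (0 : Int)) none = lst := by
    rw [PySem.List.slice_from lst (le_refl (0:Int))]
    simp
  rw [hsl] at hA
  rw [hA, hB]
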